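-- pv_equiv track=rewrite | github.com/TWLS151/Soootudy | lcj/26-03-w2/swea-5203-v1.py | check_babygin
-- ===== SOURCE A (Python) =====
-- def check_babygin(card_list):
--     for i in range(len(card_list)):  # 1. triplet 검사
--
--         if card_list[i] >= 3:
--             return True
--
--     cnt = 0
--
--     for i in range(len(card_list)):  # 2. run 검사
--
--         if card_list[i] >= 1:
--             cnt += 1
--
--             if cnt == 3:
--                 return True
--
--         else:
--             cnt = 0
--
--     return False
-- ===== SOURCE B (Python) =====
-- def check_babygin(card_list):
--     if any(c >= 3 for c in card_list):
--         return True
--     return any(a >= 1 and b >= 1 and c >= 1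
--                for a, b, c in zip(card_list, card_list[1:], card_list[2:]))
-- ===== Notes on version B (the rewrite author's own statement) =====
-- stated objective: simpler
-- what changed: Replaced the index loops (early-return triplet scan and a streak counter reset across the run loop) by any(c>=3) plus a positional zip sliding-window test over three consecutive counts, with no counter state.
import Mathlib
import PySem

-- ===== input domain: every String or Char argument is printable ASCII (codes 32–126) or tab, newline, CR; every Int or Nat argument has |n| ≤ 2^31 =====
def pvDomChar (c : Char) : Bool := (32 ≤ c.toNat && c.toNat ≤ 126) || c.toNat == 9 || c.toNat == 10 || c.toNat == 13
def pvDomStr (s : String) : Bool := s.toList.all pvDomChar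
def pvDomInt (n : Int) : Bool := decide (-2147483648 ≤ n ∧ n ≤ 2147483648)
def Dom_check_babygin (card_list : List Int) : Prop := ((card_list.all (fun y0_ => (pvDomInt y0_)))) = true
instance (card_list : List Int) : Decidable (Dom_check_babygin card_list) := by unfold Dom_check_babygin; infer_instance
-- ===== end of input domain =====

-- B replaces A's index loops (early-return triplet scan + streak counter) by any(c>=3) plus a positional zip sliding-window run test; objective: simpler.


-- ===== PORT A =====
-- first loop: for i in range(len): if card_list[i] >= 3: return True
def pvA_triplet : List Int → Bool
  | [] => false
  | c :: rest => if c ≥ 3 then true else pvA_triplet rest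

-- second loop: streak counter cnt, reset on a zero count, return True at cnt == 3
def pvA_run : Int → List Int → Bool
  | _, [] => false
  | cnt, c :: rest =>
      if c ≥ 1 then
        (if cnt + 1 = 3 then true else pvA_run (cnt + 1) rest)
      else
        pvA_run 0 rest

def check_babygin (card_list : List Int) : Bool :=
  if pvA_triplet card_list then true else pvA_run 0 card_list

-- ===== PORT B =====
def check_babygin_alt (card_list : List Int) : Bool :=
  if card_list.any (fun c => decide (c ≥ 3)) then true
  else
    (card_list.zip ((card_list.drop 1).zip (card_list.drop 2))).any
      (fun w => decide (w.1 ≥ 1) && decide (w.2.1 ≥ 1) && decide (w.2.2 ≥ 1))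

-- ===== PRECONDITION & SPEC =====
def Spec_check_babygin (card_list : List Int) (out : Bool) : Prop := out = check_babygin_alt card_list
instance (card_list : List Int) (out : Bool) : Decidable (Spec_check_babygin card_list out) := by unfold Spec_check_babygin; infer_instance

-- ===== CLAIM (what is proved, stated in full; the proofs are below) =====
def Claim_equal_check_babygin : Prop := ∀ (card_list : List Int), Dom_check_babygin card_list → Spec_check_babygin card_list (check_babygin card_list)

-- ===== LEMMAS AND PROOFS =====

-- proof-side recursive form of the sliding-window test
def pvWin3 : List Int → Bool
  | a :: b :: c :: rest =>
      (decide (a ≥ 1) && decide (b ≥ 1) && decide (c ≥ 1)) || pvWin3 (b :: c :: rest)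
  | _ => false

theorem pvA_triplet_eq_any (l : List Int) :
    pvA_triplet l = l.any (fun c => decide (c ≥ 3)) := by
  induction l with
  | nil => rfl
  | cons a rest ih =>
      by_cases h : a ≥ 3 <;> simp [pvA_triplet, h, ih]

theorem pvWin3_eq_zip_any (l : List Int) :
    (l.zip ((l.drop 1).zip (l.drop 2))).any
      (fun w => decide (w.1 ≥ 1) && decide (w.2.1 ≥ 1) && decide (w.2.2 ≥ 1)) = pvWin3 l := by
  induction l with
  | nil => rfl
  | cons a rest ih =>
      match rest with
      | [] => rfl
      | [b] => rfl
      | b :: c :: r =>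
          simp only [pvWin3, List.drop, List.zip_cons_cons, List.any_cons] at *
          rw [ih]

theorem pvA_run_char (l : List Int) :
    pvA_run 0 l = pvWin3 l
    ∧ pvA_run 1 l = ((match l with | a :: b :: _ => decide (a ≥ 1) && decide (b ≥ 1) | _ => false) || pvWin3 l)
    ∧ pvA_run 2 l = ((match l with | a :: _ => decide (a ≥ 1) | _ => false) || pvWin3 l) := by
  induction l with
  | nil => exact ⟨rfl, rfl, rfl⟩
  | cons a rest ih =>
      obtain ⟨ih0, ih1, ih2⟩ := ih
      by_cases ha : a ≥ 1
      · refine ⟨?_, ?_, ?_⟩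
        · rw [show pvA_run 0 (a :: rest) = pvA_run 1 rest from by simp [pvA_run, ha], ih1]
          match rest with
          | [] => rfl
          | [b] => simp [pvWin3]
          | b :: c :: r => simp [pvWin3, ha]
        · rw [show pvA_run 1 (a :: rest) = pvA_run 2 rest from by simp [pvA_run, ha], ih2]
          match rest with
          | [] => rfl
          | [b] => simp [pvWin3, ha]
          | b :: c :: r =>
              simp only [pvWin3, ha, decide_true, Bool.true_and]
              by_cases hb : b ≥ 1 <;> by_cases hc : c ≥ 1 <;> simp [hb, hc]
        · rw [show pvA_run 2 (a :: rest) = true from by simp [pvA_run, ha]]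
          simp [ha]
      · have step : ∀ cnt : Int, pvA_run cnt (a :: rest) = pvA_run 0 rest := by
          intro cnt; simp [pvA_run, ha]
        have hw : pvWin3 (a :: rest) = pvWin3 rest := by
          match rest with
          | [] => rfl
          | [b] => rfl
          | b :: c :: r => simp [pvWin3, ha]
        refine ⟨?_, ?_, ?_⟩ <;> rw [step, ih0, hw] <;>
          match rest with
          | [] => simp [ha]
          | b :: r => simp [ha]

-- ===== VERDICT (by name: the statement is the Claim_ definition above) =====
theorem check_babygin_spec : Claim_equal_check_babygin := by
  intro l _
  show check_babygin l = check_babygin_alt l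
  unfold check_babygin check_babygin_alt
  rw [pvA_triplet_eq_any, pvWin3_eq_zip_any, (pvA_run_char l).1]
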